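-- pv_equiv track=rewrite | github.com/AlwaysStudent/number-theory-calculator | pkg/RSA.py | get_2power_mulm
-- ===== SOURCE A (Python) =====
-- def get_2power_mulm(a):
--     if a == 0:
--         return (0, 0)
--     s = 0
--     m = a
--     while True:
--         q, r = divmod(m, 2)
--         if r == 0:
--             s = s + 1
--             m = q
--         else:
--             return (s, m)
-- ===== SOURCE B (Python) =====
-- def get_2power_mulm(a):
--     if a == 0:
--         return (0, 0)
--     s = (a & -a).bit_length() - 1
--     return (s, a >> s)
-- ===== Notes on version B (the rewrite author's own statement) =====
-- stated objective: idiomatic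
-- what changed: Replaced the per-bit divmod loop by the closed-form bit trick: s = (a & -a).bit_length() - 1 gives the 2-adic valuation directly and a >> s the odd part.
import Mathlib
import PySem

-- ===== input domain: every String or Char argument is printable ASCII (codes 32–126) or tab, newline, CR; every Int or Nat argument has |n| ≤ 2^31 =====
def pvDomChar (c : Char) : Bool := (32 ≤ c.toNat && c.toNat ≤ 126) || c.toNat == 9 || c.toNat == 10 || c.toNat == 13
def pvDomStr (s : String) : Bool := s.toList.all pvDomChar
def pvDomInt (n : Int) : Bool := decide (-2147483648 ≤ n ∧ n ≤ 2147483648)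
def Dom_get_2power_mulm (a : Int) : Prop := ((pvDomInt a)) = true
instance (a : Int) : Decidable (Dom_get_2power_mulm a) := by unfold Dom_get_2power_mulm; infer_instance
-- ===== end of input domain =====

-- B replaces A's per-bit divmod loop by the closed-form bit trick s = (a & -a).bit_length() - 1, m = a >> s (idiomatic; return value only, no side effects).


-- ===== PORT A =====
-- A's 'while True' loop; the fuel argument only makes the recursion total in Lean:
-- for m ≠ 0 (the only way A reaches the loop) fuel = |a| + 1 is never exhausted.
def pvLoopA : Nat → Int → Int → Int × Int
  | 0, s, m => (s, m)
  | fuel + 1, s, m =>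
      let q := PySem.Int.floordiv m 2
      let r := PySem.Int.mod m 2
      if r = 0 then pvLoopA fuel (s + 1) q else (s, m)

def get_2power_mulm (a : Int) : Int × Int :=
  if a = 0 then (0, 0) else pvLoopA (a.natAbs + 1) 0 a

-- ===== PORT B =====
-- Python's `a & -a` is PySem.Int.band, `.bit_length()` is PySem.Int.bitLength (both Python-exact
-- on negatives); `a >> s` with s ≥ 0 (always the case here) is core `>>>` (floors, per PYSEM.md).
def get_2power_mulm_alt (a : Int) : Int × Int :=
  if a = 0 then (0, 0)
  else
    let s : Int := (PySem.Int.bitLength (PySem.Int.band a (-a)) : Int) - 1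
    (s, a >>> s.toNat)

-- ===== PRECONDITION & SPEC =====
def Spec_get_2power_mulm (a : Int) (out : Int × Int) : Prop := out = get_2power_mulm_alt a
instance (a : Int) (out : Int × Int) : Decidable (Spec_get_2power_mulm a out) := by unfold Spec_get_2power_mulm; infer_instance

-- ===== CLAIM (what is proved, stated in full; the proofs are below) =====
def Claim_equal_get_2power_mulm : Prop := ∀ (a : Int), Dom_get_2power_mulm a → Spec_get_2power_mulm a (get_2power_mulm a)

-- ===== LEMMAS AND PROOFS =====

-- 2-adic valuation of a natural number (proof-side helper only).
def pvV2 (n : Nat) : Nat :=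
  if h : n ≠ 0 ∧ n % 2 = 0 then pvV2 (n / 2) + 1 else 0
termination_by n
decreasing_by exact Nat.div_lt_self (by omega) (by omega)

lemma pvV2_odd {n : Nat} (h : n % 2 = 1) : pvV2 n = 0 := by
  rw [pvV2]; simp [show ¬(n ≠ 0 ∧ n % 2 = 0) by omega]

lemma pvV2_even {n : Nat} (h0 : n ≠ 0) (h2 : n % 2 = 0) : pvV2 n = pvV2 (n / 2) + 1 := by
  rw [pvV2]; simp [h0, h2]

lemma pvTwoPow_v2_le {n : Nat} (h : n ≠ 0) : 2 ^ pvV2 n ≤ n := by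
  induction n using pvV2.induct with
  | case1 n hc ih =>
      rw [pvV2_even hc.1 hc.2, pow_succ]
      have := ih (by omega)
      omega
  | case2 n hc =>
      rcases Decidable.em (n % 2 = 0) with h2 | h2
      · exact absurd ⟨h, h2⟩ hc
      · rw [pvV2_odd (by omega)]; omega

-- clearing the lowest set bit: n & (n-1) = n - 2^(v2 n)
lemma pvLand_pred {n : Nat} (h : n ≠ 0) : n &&& (n - 1) = n - 2 ^ pvV2 n := by
  induction n using pvV2.induct with
  | case1 n hc ih =>
      obtain ⟨h0, h2⟩ := hc
      have e1 : n = Nat.bit false (n / 2) := by simp [Nat.bit]; omega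
      have e2 : n - 1 = Nat.bit true (n / 2 - 1) := by simp [Nat.bit]; omega
      have hb := Nat.land_bit false (n / 2) true (n / 2 - 1)
      rw [← e1, ← e2] at hb
      rw [pvV2_even h0 h2, hb]
      have ih' := ih (by omega)
      have hle := pvTwoPow_v2_le (n := n / 2) (by omega)
      simp [Nat.bit, ih', pow_succ]
      omega
  | case2 n hc =>
      rcases Decidable.em (n % 2 = 0) with h2 | h2
      · exact absurd ⟨h, h2⟩ hc
      · have h1 : n % 2 = 1 := by omega
        have e1 : n = Nat.bit true (n / 2) := by simp [Nat.bit]; omega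
        have e2 : n - 1 = Nat.bit false (n / 2) := by simp [Nat.bit]; omega
        have hb := Nat.land_bit true (n / 2) false (n / 2)
        rw [← e1, ← e2] at hb
        rw [pvV2_odd h1, hb]
        simp [Nat.bit, Nat.and_self]
        omega

-- a & -a = 2^(v2 |a|) for a ≠ 0, Python semantics
lemma pvBand_neg_self {a : Int} (h : a ≠ 0) :
    PySem.Int.band a (-a) = ((2 ^ pvV2 a.natAbs : Nat) : Int) := by
  rcases lt_trichotomy a 0 with hneg | hz | hpos
  · have : PySem.Int.band a (-a) = PySem.Int.band (-a) (-(-a)) := by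
      rw [neg_neg, PySem.Int.band_comm]
    rw [this]
    have hpos' : 0 < -a := by omega
    rw [PySem.Int.band.eq_1]
    have h1 : (0 : Int) ≤ -a := by omega
    have h2 : ¬ (0 : Int) ≤ -(-a) := by omega
    simp only [h1, h2, if_true, if_false]
    have e : (-(-(-a)) - 1).toNat = (-a).toNat - 1 := by omega
    have hle := pvTwoPow_v2_le (n := (-a).toNat) (by omega)
    rw [e, pvLand_pred (n := (-a).toNat) (by omega), Nat.sub_sub_self hle,
        show a.natAbs = (-a).toNat by omega]
  · exact absurd hz h
  · rw [PySem.Int.band.eq_1]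
    have h1 : (0 : Int) ≤ a := by omega
    have h2 : ¬ (0 : Int) ≤ -a := by omega
    simp only [h1, h2, if_true, if_false]
    have e : (-(-a) - 1).toNat = a.toNat - 1 := by omega
    have hle := pvTwoPow_v2_le (n := a.toNat) (by omega)
    rw [e, pvLand_pred (n := a.toNat) (by omega), Nat.sub_sub_self hle,
        show a.natAbs = a.toNat by omega]

lemma pvBitLength_two_pow (v : Nat) : PySem.Int.bitLength ((2 ^ v : Nat) : Int) = v + 1 := by
  induction v with
  | zero =>
      rw [PySem.Int.bitLength_natCast (by norm_num)]
      norm_num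
  | succ v ih =>
      rw [PySem.Int.bitLength_natCast (by positivity)]
      have : 2 ^ (v + 1) / 2 = 2 ^ v := by omega
      rw [this, ih]

lemma pvShift_succ (m : Int) (v : Nat) : m >>> (v + 1) = (m / 2) >>> v := by
  rw [Int.shiftRight_eq_div_pow, Int.shiftRight_eq_div_pow,
      Int.ediv_ediv_of_nonneg (by norm_num : (0:Int) ≤ 2)]
  congr 1
  push_cast [pow_succ]
  ring

lemma pvLoopA_eq (fuel : Nat) : ∀ (s m : Int), m ≠ 0 → m.natAbs < fuel →
    pvLoopA fuel s m = (s + (pvV2 m.natAbs : Int), m >>> pvV2 m.natAbs) := by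
  induction fuel with
  | zero => intro s m _ hf; omega
  | succ fuel ih =>
      intro s m hm hf
      show (let q := PySem.Int.floordiv m 2
            let r := PySem.Int.mod m 2
            if r = 0 then pvLoopA fuel (s + 1) q else (s, m)) = _
      rw [PySem.Int.mod_eq_emod_of_pos (by norm_num), PySem.Int.floordiv_eq_ediv_of_pos (by norm_num)]
      simp only []
      by_cases h2 : m % 2 = 0
      · rw [if_pos h2]
        have hq : m / 2 ≠ 0 := by omega
        have hqf : (m / 2).natAbs < fuel := by omega
        rw [ih (s + 1) (m / 2) hq hqf]
        have hv : pvV2 m.natAbs = pvV2 ((m / 2).natAbs) + 1 := by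
          rw [pvV2_even (by omega) (by omega)]
          congr 2
          omega
        rw [hv, pvShift_succ m _]
        simp only [Prod.mk.injEq, and_true]
        push_cast; ring
      · rw [if_neg h2]
        have h1 : m.natAbs % 2 = 1 := by omega
        rw [pvV2_odd h1]
        simp [Int.shiftRight_eq_div_pow]

-- ===== VERDICT (by name: the statement is the Claim_ definition above) =====
theorem get_2power_mulm_spec : Claim_equal_get_2power_mulm := by
  intro a _
  unfold Spec_get_2power_mulm get_2power_mulm get_2power_mulm_alt
  by_cases h : a = 0
  · simp [h]
  · rw [if_neg h, if_neg h]
    rw [pvLoopA_eq (a.natAbs + 1) 0 a h (by omega)]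
    rw [pvBand_neg_self h, pvBitLength_two_pow]
    have e : ((((pvV2 a.natAbs + 1 : Nat) : Int) - 1)) = (pvV2 a.natAbs : Int) := by push_cast; ring
    simp only [e]
    simp
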